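-- pv_equiv track=rewrite | github.com/mikedeik/ConvexHullAlgorithms | testbfs.py | bfs_traversal_from_index
-- ===== SOURCE A (Python) =====
-- from collections import deque
--
-- def bfs_traversal_from_index(lst, start_index):
--     if not (0 <= start_index < len(lst)):
--         return []
--
--     visited = [False] * len(lst)
--     result = []
--     queue = deque()
--
--     queue.append(start_index)
--     visited[start_index] = True
--
--     while queue:
--         current_index = queue.popleft()
--         result.append(lst[current_index])
--
--         # Find neighbors (adjacent elements) and visit them
--         for neighbor_index in [current_index - 1, current_index + 1]:
--             if 0 <= neighbor_index < len(lst) and not visited[neighbor_index]: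
--                 queue.append(neighbor_index)
--                 visited[neighbor_index] = True
--
--     return result
-- ===== SOURCE B (Python) =====
-- def bfs_traversal_from_index(lst, start_index):
--     # Outward expansion over distances: no queue, no visited array.
--     n = len(lst)
--     if not (0 <= start_index < n):
--         return []
--     out = [lst[start_index]]
--     d = 1
--     while start_index - d >= 0 or start_index + d < n:
--         if start_index - d >= 0:
--             out.append(lst[start_index - d])
--         if start_index + d < n:
--             out.append(lst[start_index + d])
--         d += 1
--     return out
-- ===== Notes on version B (the rewrite author's own statement) =====
-- stated objective: simpler
-- what changed: Replaces the BFS machinery (deque, visited array, neighbor loop over a line graph) with a direct outward-expansion loop over distances d = 1, 2, ... emitting lst[start-d] then lst[start+d] while in range.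
import Mathlib
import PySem

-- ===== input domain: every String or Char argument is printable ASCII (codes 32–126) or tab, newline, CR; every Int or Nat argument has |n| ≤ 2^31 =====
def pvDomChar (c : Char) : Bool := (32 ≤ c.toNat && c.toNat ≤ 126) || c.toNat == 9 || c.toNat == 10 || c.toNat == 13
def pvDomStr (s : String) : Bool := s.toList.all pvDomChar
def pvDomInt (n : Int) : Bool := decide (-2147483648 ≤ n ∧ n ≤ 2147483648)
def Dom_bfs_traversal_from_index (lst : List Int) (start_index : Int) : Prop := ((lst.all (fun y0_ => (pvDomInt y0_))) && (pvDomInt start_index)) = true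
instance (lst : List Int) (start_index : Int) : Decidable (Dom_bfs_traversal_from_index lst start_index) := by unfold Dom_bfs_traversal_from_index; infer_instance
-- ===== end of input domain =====

-- B replaces A's BFS machinery (deque + visited array + neighbor loop) with a direct
-- outward-expansion loop over distances d = 1, 2, ... (simpler; same cost).


-- ===== PORT A =====
-- the while loop: fuel = lst.length bounds the number of pops (each enqueue marks a
-- fresh index visited, so at most lst.length indices are ever popped)
def bfsAux (lst : List Int) : Nat → List Int → List Bool → List Int → List Int
  | 0, _, _, result => result
  | _ + 1, [], _, result => result
  | fuel + 1, current :: rest, visited, result =>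
    let result2 := result ++ [lst.getD current.toNat 0]
    -- for neighbor_index in [current-1, current+1]: unrolled two-iteration loop
    let p1 := if 0 ≤ current - 1 ∧ current - 1 < (lst.length : Int) ∧ visited.getD (current - 1).toNat false = false
              then (rest ++ [current - 1], visited.set (current - 1).toNat true)
              else (rest, visited)
    let p2 := if 0 ≤ current + 1 ∧ current + 1 < (lst.length : Int) ∧ p1.2.getD (current + 1).toNat false = false
              then (p1.1 ++ [current + 1], p1.2.set (current + 1).toNat true)
              else p1
    bfsAux lst fuel p2.1 p2.2 result2

def bfs_traversal_from_index (lst : List Int) (start_index : Int) : List Int :=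
  if 0 ≤ start_index ∧ start_index < (lst.length : Int) then
    bfsAux lst lst.length [start_index]
      ((List.replicate lst.length false).set start_index.toNat true) []
  else []

-- ===== PORT B =====
-- the while loop over d; fuel = lst.length bounds its iteration count
def altAux (lst : List Int) (s : Int) : Nat → Nat → List Int
  | _, 0 => []
  | d, fuel + 1 =>
    if 0 ≤ s - (d : Int) ∨ s + (d : Int) < (lst.length : Int) then
      (if 0 ≤ s - (d : Int) then [lst.getD (s - (d : Int)).toNat 0] else []) ++
      (if s + (d : Int) < (lst.length : Int) then [lst.getD (s + (d : Int)).toNat 0] else []) ++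
      altAux lst s (d + 1) fuel
    else []

def bfs_traversal_from_index_alt (lst : List Int) (start_index : Int) : List Int :=
  if 0 ≤ start_index ∧ start_index < (lst.length : Int) then
    lst.getD start_index.toNat 0 :: altAux lst start_index 1 lst.length
  else []

-- ===== PRECONDITION & SPEC =====
def Spec_bfs_traversal_from_index (lst : List Int) (start_index : Int) (out : List Int) : Prop := out = bfs_traversal_from_index_alt lst start_index
instance (lst : List Int) (start_index : Int) (out : List Int) : Decidable (Spec_bfs_traversal_from_index lst start_index out) := by unfold Spec_bfs_traversal_from_index; infer_instance

-- ===== CLAIM (what is proved, stated in full; the proofs are below) =====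
def Claim_equal_bfs_traversal_from_index : Prop := ∀ (lst : List Int) (start_index : Int), Dom_bfs_traversal_from_index lst start_index → Spec_bfs_traversal_from_index lst start_index (bfs_traversal_from_index lst start_index)

-- ===== LEMMAS AND PROOFS =====

-- the queue and visited array A maintains, as functions of the current distance d
def queueOf (n : Nat) (s : Int) (d : Nat) : List Int :=
  (if 0 ≤ s - (d : Int) then [s - (d : Int)] else []) ++
  (if s + (d : Int) < (n : Int) then [s + (d : Int)] else [])

-- visited = the indicator of the interval [lo, hi] of indices
def visI (n : Nat) (lo hi : Int) : List Bool :=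
  (List.range n).map (fun i : Nat => decide (lo ≤ (i : Int) ∧ (i : Int) ≤ hi))

-- the number of still-unvisited indices just before processing distance d (= pops remaining)
def popCount (n : Nat) (s : Int) (d : Nat) : Nat :=
  (if 0 ≤ s - (d : Int) then (s - (d : Int)).toNat + 1 else 0) +
  (if s + (d : Int) < (n : Int) then n - (s + (d : Int)).toNat else 0)

theorem range_map_getD {α : Type} (n i : Nat) (f : Nat → α) (dflt : α) :
    ((List.range n).map f).getD i dflt = if i < n then f i else dflt := by
  by_cases h : i < n
  · simp [List.getD, h]
  · simp [List.getD, h]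

theorem range_map_set {α : Type} (n i : Nat) (f : Nat → α) (b : α) :
    ((List.range n).map f).set i b = (List.range n).map (fun j => if j = i then b else f j) := by
  apply List.ext_getElem
  · simp
  · intro j h1 h2
    simp only [List.getElem_set, List.getElem_map, List.getElem_range]
    by_cases h : i = j <;> simp [h, eq_comm]

theorem visI_getD (n : Nat) (lo hi x : Int) (hx0 : 0 ≤ x) (hxn : x < (n : Int)) :
    (visI n lo hi).getD x.toNat false = decide (lo ≤ x ∧ x ≤ hi) := by
  rw [visI, range_map_getD]
  have hx : ((x.toNat : Nat) : Int) = x := Int.toNat_of_nonneg hx0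
  have : x.toNat < n := by omega
  simp [this, hx]

theorem visI_congr (n : Nat) (lo hi lo' hi' : Int)
    (h : ∀ i : Nat, i < n → ((lo ≤ (i : Int) ∧ (i : Int) ≤ hi) ↔ (lo' ≤ (i : Int) ∧ (i : Int) ≤ hi'))) :
    visI n lo hi = visI n lo' hi' := by
  unfold visI
  apply List.map_congr_left
  intro i hi
  have := h i (List.mem_range.mp hi)
  simp [this]

theorem visI_set_lo (n : Nat) (lo hi : Int) (h0 : 0 ≤ lo - 1) (_hn : lo - 1 < (n : Int))
    (hh : lo - 1 ≤ hi) :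
    (visI n lo hi).set (lo - 1).toNat true = visI n (lo - 1) hi := by
  rw [visI, range_map_set]
  apply List.map_congr_left
  intro i hi'
  have hi2 := List.mem_range.mp hi'
  by_cases h : i = (lo - 1).toNat
  · simp [h]
    omega
  · simp only [if_neg h]
    have : ¬ ((i : Int) = lo - 1) := by omega
    simp only [decide_eq_decide]
    omega

theorem visI_set_hi (n : Nat) (lo hi : Int) (h0 : 0 ≤ hi + 1) (_hn : hi + 1 < (n : Int))
    (hh : lo ≤ hi + 1) :
    (visI n lo hi).set (hi + 1).toNat true = visI n lo (hi + 1) := by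
  rw [visI, range_map_set]
  apply List.map_congr_left
  intro i hi'
  have hi2 := List.mem_range.mp hi'
  by_cases h : i = (hi + 1).toNat
  · simp [h]
    omega
  · simp only [if_neg h]
    have : ¬ ((i : Int) = hi + 1) := by omega
    simp only [decide_eq_decide]
    omega

theorem vis_init (n : Nat) (s : Int) (hs0 : 0 ≤ s) (_hsn : s < (n : Int)) :
    (List.replicate n false).set s.toNat true = visI n s s := by
  apply List.ext_getElem
  · simp [visI]
  · intro j h1 h2
    simp only [List.getElem_set, List.getElem_replicate, visI, List.getElem_map,
      List.getElem_range]
    have hj : j < n := by simpa [visI] using h2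
    by_cases h : s.toNat = j
    · simp [h]
      omega
    · rw [if_neg h]
      have : ¬ (s ≤ (j : Int) ∧ (j : Int) ≤ s) := by omega
      simp [this]

theorem pop_left (lst : List Int) (s : Int) (fa d : Nat) (hd : 1 ≤ d)
    (hsn : s < (lst.length : Int)) (hl : 0 ≤ s - (d : Int)) (rest res : List Int) :
    bfsAux lst (fa + 1) ((s - (d : Int)) :: rest) (visI lst.length (s - (d : Int)) (s + (d : Int))) res
    = bfsAux lst fa (rest ++ (if 0 ≤ s - (d : Int) - 1 then [s - (d : Int) - 1] else []))
        (visI lst.length (if 0 ≤ s - (d : Int) - 1 then s - (d : Int) - 1 else s - (d : Int)) (s + (d : Int)))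
        (res ++ [lst.getD (s - (d : Int)).toNat 0]) := by
  have hg2 : ∀ lo : Int, lo ≤ s - (d : Int) →
      (visI lst.length lo (s + (d : Int))).getD (s - (d : Int) + 1).toNat false = true := by
    intro lo hlo
    rw [visI_getD _ _ _ _ (by omega) (by omega)]
    simp only [decide_eq_true_eq]
    omega
  simp only [bfsAux]
  by_cases hL2 : 0 ≤ s - (d : Int) - 1
  · have hg1 : (visI lst.length (s - (d : Int)) (s + (d : Int))).getD (s - (d : Int) - 1).toNat false = false := by
      rw [visI_getD _ _ _ _ hL2 (by omega)]
      simp only [decide_eq_false_iff_not]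
      omega
    have c1 : 0 ≤ s - (d : Int) - 1 ∧ s - (d : Int) - 1 < (lst.length : Int) ∧
        (visI lst.length (s - (d : Int)) (s + (d : Int))).getD (s - (d : Int) - 1).toNat false = false :=
      ⟨hL2, by omega, hg1⟩
    simp only [if_pos c1]
    rw [visI_set_lo _ _ _ hL2 (by omega) (by omega)]
    have c2 : ¬ (0 ≤ s - (d : Int) + 1 ∧ s - (d : Int) + 1 < (lst.length : Int) ∧
        (visI lst.length (s - (d : Int) - 1) (s + (d : Int))).getD (s - (d : Int) + 1).toNat false = false) := by
      intro h
      have h3 := h.2.2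
      rw [hg2 _ (by omega)] at h3
      simp at h3
    simp only [if_neg c2]
    simp only [if_pos hL2]
  · have c1 : ¬ (0 ≤ s - (d : Int) - 1 ∧ s - (d : Int) - 1 < (lst.length : Int) ∧
        (visI lst.length (s - (d : Int)) (s + (d : Int))).getD (s - (d : Int) - 1).toNat false = false) :=
      fun h => hL2 h.1
    simp only [if_neg c1]
    have c2 : ¬ (0 ≤ s - (d : Int) + 1 ∧ s - (d : Int) + 1 < (lst.length : Int) ∧
        (visI lst.length (s - (d : Int)) (s + (d : Int))).getD (s - (d : Int) + 1).toNat false = false) := by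
      intro h
      have h3 := h.2.2
      rw [hg2 _ (by omega)] at h3
      simp at h3
    simp only [if_neg c2]
    simp only [if_neg hL2]
    rw [List.append_nil]

theorem pop_right (lst : List Int) (s lo : Int) (fa d : Nat) (hd : 1 ≤ d)
    (hs0 : 0 ≤ s) (hr : s + (d : Int) < (lst.length : Int)) (hlo : lo ≤ s - (d : Int))
    (rest res : List Int) :
    bfsAux lst (fa + 1) ((s + (d : Int)) :: rest) (visI lst.length lo (s + (d : Int))) res
    = bfsAux lst fa (rest ++ (if s + (d : Int) + 1 < (lst.length : Int) then [s + (d : Int) + 1] else []))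
        (visI lst.length lo (if s + (d : Int) + 1 < (lst.length : Int) then s + (d : Int) + 1 else s + (d : Int)))
        (res ++ [lst.getD (s + (d : Int)).toNat 0]) := by
  have hg1 : (visI lst.length lo (s + (d : Int))).getD (s + (d : Int) - 1).toNat false = true := by
    rw [visI_getD _ _ _ _ (by omega) (by omega)]
    simp only [decide_eq_true_eq]
    omega
  simp only [bfsAux]
  have c1 : ¬ (0 ≤ s + (d : Int) - 1 ∧ s + (d : Int) - 1 < (lst.length : Int) ∧
      (visI lst.length lo (s + (d : Int))).getD (s + (d : Int) - 1).toNat false = false) := by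
    intro h
    have h3 := h.2.2
    rw [hg1] at h3
    simp at h3
  simp only [if_neg c1]
  by_cases hR2 : s + (d : Int) + 1 < (lst.length : Int)
  · have hg2 : (visI lst.length lo (s + (d : Int))).getD (s + (d : Int) + 1).toNat false = false := by
      rw [visI_getD _ _ _ _ (by omega) hR2]
      simp only [decide_eq_false_iff_not]
      omega
    have c2 : 0 ≤ s + (d : Int) + 1 ∧ s + (d : Int) + 1 < (lst.length : Int) ∧
        (visI lst.length lo (s + (d : Int))).getD (s + (d : Int) + 1).toNat false = false :=
      ⟨by omega, hR2, hg2⟩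
    simp only [if_pos c2]
    rw [visI_set_hi _ _ _ (by omega) hR2 (by omega)]
    simp only [if_pos hR2]
  · have c2 : ¬ (0 ≤ s + (d : Int) + 1 ∧ s + (d : Int) + 1 < (lst.length : Int) ∧
        (visI lst.length lo (s + (d : Int))).getD (s + (d : Int) + 1).toNat false = false) :=
      fun h => hR2 h.2.1
    simp only [if_neg c2]
    simp only [if_neg hR2]
    rw [List.append_nil]

theorem key (lst : List Int) (s : Int) (hs0 : 0 ≤ s) (hsn : s < (lst.length : Int)) :
    ∀ P fa fb d (res : List Int), 1 ≤ d →
    P = popCount lst.length s d → P ≤ fa → P ≤ fb →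
    bfsAux lst fa (queueOf lst.length s d) (visI lst.length (s - (d : Int)) (s + (d : Int))) res
      = res ++ altAux lst s d fb := by
  intro P
  induction P using Nat.strong_induction_on with
  | _ P IH =>
  intro fa fb d res hd hP hfa hfb
  by_cases hl : 0 ≤ s - (d : Int)
  · by_cases hr : s + (d : Int) < (lst.length : Int)
    · -- both neighbors exist: two pops this round
      rw [popCount, if_pos hl, if_pos hr] at hP
      obtain ⟨fa2, rfl⟩ : ∃ k, fa = k + 1 + 1 := ⟨fa - 2, by omega⟩
      obtain ⟨fb1, rfl⟩ : ∃ k, fb = k + 1 := ⟨fb - 1, by omega⟩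
      rw [queueOf, if_pos hl, if_pos hr, List.singleton_append]
      rw [pop_left lst s (fa2 + 1) d hd hsn hl]
      rw [List.singleton_append]
      rw [pop_right lst s _ fa2 d hd hs0 hr (by split_ifs <;> omega)]
      have hq : (if 0 ≤ s - (d : Int) - 1 then [s - (d : Int) - 1] else []) ++
          (if s + (d : Int) + 1 < (lst.length : Int) then [s + (d : Int) + 1] else [])
          = queueOf lst.length s (d + 1) := by
        rw [queueOf]
        push_cast
        rw [show s - ((d : Int) + 1) = s - (d : Int) - 1 from by ring,
            show s + ((d : Int) + 1) = s + (d : Int) + 1 from by ring]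
      have hv : visI lst.length (if 0 ≤ s - (d : Int) - 1 then s - (d : Int) - 1 else s - (d : Int))
          (if s + (d : Int) + 1 < (lst.length : Int) then s + (d : Int) + 1 else s + (d : Int))
          = visI lst.length (s - ((d + 1 : Nat) : Int)) (s + ((d + 1 : Nat) : Int)) := by
        apply visI_congr
        intro i hi
        push_cast
        split_ifs <;> omega
      rw [hq, hv]
      rw [IH (P - 2) (by omega) fa2 fb1 (d + 1) _ (by omega)
        (by rw [popCount]; push_cast
            rw [show s - ((d : Int) + 1) = s - (d : Int) - 1 from by ring,
                show s + ((d : Int) + 1) = s + (d : Int) + 1 from by ring]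
            split_ifs <;> omega)
        (by omega) (by omega)]
      conv_rhs => rw [altAux]
      rw [if_pos (Or.inl hl), if_pos hl, if_pos hr]
      simp [List.append_assoc]
    · -- only the left neighbor: one pop this round
      rw [popCount, if_pos hl, if_neg hr] at hP
      obtain ⟨fa1, rfl⟩ : ∃ k, fa = k + 1 := ⟨fa - 1, by omega⟩
      obtain ⟨fb1, rfl⟩ : ∃ k, fb = k + 1 := ⟨fb - 1, by omega⟩
      rw [queueOf, if_pos hl, if_neg hr, List.append_nil]
      rw [pop_left lst s fa1 d hd hsn hl, List.nil_append]
      have hq : (if 0 ≤ s - (d : Int) - 1 then [s - (d : Int) - 1] else [])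
          = queueOf lst.length s (d + 1) := by
        rw [queueOf]
        push_cast
        rw [show s - ((d : Int) + 1) = s - (d : Int) - 1 from by ring,
            show s + ((d : Int) + 1) = s + (d : Int) + 1 from by ring]
        rw [if_neg (show ¬ (s + (d : Int) + 1 < (lst.length : Int)) from by omega), List.append_nil]
      have hv : visI lst.length (if 0 ≤ s - (d : Int) - 1 then s - (d : Int) - 1 else s - (d : Int))
          (s + (d : Int))
          = visI lst.length (s - ((d + 1 : Nat) : Int)) (s + ((d + 1 : Nat) : Int)) := by
        apply visI_congr
        intro i hi
        push_cast
        split_ifs <;> omega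
      rw [hq, hv]
      rw [IH (P - 1) (by omega) fa1 fb1 (d + 1) _ (by omega)
        (by rw [popCount]; push_cast
            rw [show s - ((d : Int) + 1) = s - (d : Int) - 1 from by ring,
                show s + ((d : Int) + 1) = s + (d : Int) + 1 from by ring]
            split_ifs <;> omega)
        (by omega) (by omega)]
      conv_rhs => rw [altAux]
      rw [if_pos (Or.inl hl), if_pos hl, if_neg hr]
      simp [List.append_assoc]
  · by_cases hr : s + (d : Int) < (lst.length : Int)
    · -- only the right neighbor: one pop this round
      rw [popCount, if_neg hl, if_pos hr] at hP
      obtain ⟨fa1, rfl⟩ : ∃ k, fa = k + 1 := ⟨fa - 1, by omega⟩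
      obtain ⟨fb1, rfl⟩ : ∃ k, fb = k + 1 := ⟨fb - 1, by omega⟩
      rw [queueOf, if_neg hl, if_pos hr, List.nil_append]
      rw [pop_right lst s _ fa1 d hd hs0 hr (by omega), List.nil_append]
      have hq : (if s + (d : Int) + 1 < (lst.length : Int) then [s + (d : Int) + 1] else [])
          = queueOf lst.length s (d + 1) := by
        rw [queueOf]
        push_cast
        rw [show s - ((d : Int) + 1) = s - (d : Int) - 1 from by ring,
            show s + ((d : Int) + 1) = s + (d : Int) + 1 from by ring]
        rw [if_neg (show ¬ (0 ≤ s - (d : Int) - 1) from by omega), List.nil_append]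
      have hv : visI lst.length (s - (d : Int))
          (if s + (d : Int) + 1 < (lst.length : Int) then s + (d : Int) + 1 else s + (d : Int))
          = visI lst.length (s - ((d + 1 : Nat) : Int)) (s + ((d + 1 : Nat) : Int)) := by
        apply visI_congr
        intro i hi
        push_cast
        split_ifs <;> omega
      rw [hq, hv]
      rw [IH (P - 1) (by omega) fa1 fb1 (d + 1) _ (by omega)
        (by rw [popCount]; push_cast
            rw [show s - ((d : Int) + 1) = s - (d : Int) - 1 from by ring,
                show s + ((d : Int) + 1) = s + (d : Int) + 1 from by ring]
            split_ifs <;> omega)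
        (by omega) (by omega)]
      conv_rhs => rw [altAux]
      rw [if_pos (Or.inr hr), if_neg hl, if_pos hr]
      simp [List.append_assoc]
    · -- both sides exhausted: the queue is empty and B's loop condition fails
      rw [queueOf, if_neg hl, if_neg hr, List.append_nil]
      cases fa <;> cases fb <;> simp [bfsAux, altAux, hr] <;> exact fun h => absurd h (by omega)

theorem pop0 (lst : List Int) (s : Int) (fa : Nat) (hs0 : 0 ≤ s) (hsn : s < (lst.length : Int)) :
    bfsAux lst (fa + 1) [s] (visI lst.length s s) []
    = bfsAux lst fa (queueOf lst.length s 1) (visI lst.length (s - 1) (s + 1)) [lst.getD s.toNat 0] := by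
  simp only [bfsAux]
  by_cases h1 : 0 ≤ s - 1
  · have hg1 : (visI lst.length s s).getD (s - 1).toNat false = false := by
      rw [visI_getD _ _ _ _ h1 (by omega)]
      simp only [decide_eq_false_iff_not]
      omega
    have c1 : 0 ≤ s - 1 ∧ s - 1 < (lst.length : Int) ∧
        (visI lst.length s s).getD (s - 1).toNat false = false := ⟨h1, by omega, hg1⟩
    simp only [if_pos c1]
    rw [visI_set_lo _ _ _ h1 (by omega) (by omega)]
    by_cases h2 : s + 1 < (lst.length : Int)
    · have hg2 : (visI lst.length (s - 1) s).getD (s + 1).toNat false = false := by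
        rw [visI_getD _ _ _ _ (by omega) h2]
        simp only [decide_eq_false_iff_not]
        omega
      have c2 : 0 ≤ s + 1 ∧ s + 1 < (lst.length : Int) ∧
          (visI lst.length (s - 1) s).getD (s + 1).toNat false = false := ⟨by omega, h2, hg2⟩
      simp only [if_pos c2]
      rw [visI_set_hi _ _ _ (by omega) h2 (by omega)]
      rw [queueOf]
      push_cast
      rw [if_pos h1, if_pos h2]
      rfl
    · have c2 : ¬ (0 ≤ s + 1 ∧ s + 1 < (lst.length : Int) ∧
          (visI lst.length (s - 1) s).getD (s + 1).toNat false = false) := fun h => h2 h.2.1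
      simp only [if_neg c2]
      rw [queueOf]
      push_cast
      rw [if_pos h1, if_neg h2, List.append_nil]
      rw [visI_congr lst.length (s - 1) s (s - 1) (s + 1) (fun i hi => by omega)]
      rfl
  · have c1 : ¬ (0 ≤ s - 1 ∧ s - 1 < (lst.length : Int) ∧
        (visI lst.length s s).getD (s - 1).toNat false = false) := fun h => h1 h.1
    simp only [if_neg c1]
    by_cases h2 : s + 1 < (lst.length : Int)
    · have hg2 : (visI lst.length s s).getD (s + 1).toNat false = false := by
        rw [visI_getD _ _ _ _ (by omega) h2]
        simp only [decide_eq_false_iff_not]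
        omega
      have c2 : 0 ≤ s + 1 ∧ s + 1 < (lst.length : Int) ∧
          (visI lst.length s s).getD (s + 1).toNat false = false := ⟨by omega, h2, hg2⟩
      simp only [if_pos c2]
      rw [visI_set_hi _ _ _ (by omega) h2 (by omega)]
      rw [queueOf]
      push_cast
      rw [if_neg h1, if_pos h2]
      rw [visI_congr lst.length s (s + 1) (s - 1) (s + 1) (fun i hi => by omega)]
      rfl
    · have c2 : ¬ (0 ≤ s + 1 ∧ s + 1 < (lst.length : Int) ∧
          (visI lst.length s s).getD (s + 1).toNat false = false) := fun h => h2 h.2.1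
      simp only [if_neg c2]
      rw [queueOf]
      push_cast
      rw [if_neg h1, if_neg h2, List.append_nil]
      rw [visI_congr lst.length s s (s - 1) (s + 1) (fun i hi => by omega)]
      rfl

theorem bfs_traversal_from_index_spec : Claim_equal_bfs_traversal_from_index := by
  intro lst s _
  rw [Spec_bfs_traversal_from_index, bfs_traversal_from_index, bfs_traversal_from_index_alt]
  by_cases h : 0 ≤ s ∧ s < (lst.length : Int)
  · obtain ⟨hs0, hsn⟩ := h
    rw [if_pos ⟨hs0, hsn⟩, if_pos ⟨hs0, hsn⟩]
    rw [vis_init lst.length s hs0 hsn]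
    obtain ⟨m, hm⟩ : ∃ m, lst.length = m + 1 := ⟨lst.length - 1, by omega⟩
    have e : bfsAux lst lst.length [s] (visI lst.length s s) []
        = bfsAux lst (m + 1) [s] (visI lst.length s s) [] := by rw [hm]
    rw [e, pop0 lst s m hs0 hsn]
    have K := key lst s hs0 hsn (popCount lst.length s 1) m lst.length 1
      [lst.getD s.toNat 0] (le_refl 1) rfl
      (by rw [popCount]; push_cast; split_ifs <;> omega)
      (by rw [popCount]; push_cast; split_ifs <;> omega)
    push_cast at K
    rw [K, List.singleton_append]
  · rw [if_neg h, if_neg h]
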